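-- pv_equiv track=rewrite | github.com/ASSERT-KTH/code-embedding-difference | JEPA_region/src/utils.py | valid_token_ids
-- ===== SOURCE A (Python) =====
-- from typing import Any, Dict, List, Optional, Sequence
--
-- def valid_token_ids(
--     input_ids: Sequence[int],
--     attention_mask: Optional[Sequence[int]] = None,
--     ignore_token_ids: Optional[set[int]] = None,
-- ) -> List[int]:
--     ignore_token_ids = ignore_token_ids or set()
--     output: List[int] = []
--     for idx, token_id in enumerate(input_ids):
--         if attention_mask is not None and int(attention_mask[idx]) == 0:
--             break
--         if int(token_id) in ignore_token_ids:
--             continue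
--         output.append(int(token_id))
--     return output
-- ===== SOURCE B (Python) =====
-- from typing import List, Optional, Sequence
--
-- def valid_token_ids(
--     input_ids: Sequence[int],
--     attention_mask: Optional[Sequence[int]] = None,
--     ignore_token_ids: Optional[set] = None,
-- ) -> List[int]:
--     # Pass 1: find the cutoff = first index whose mask entry is 0
--     # (indexing the mask by position, so a too-short mask raises the
--     # same IndexError as the original).
--     cutoff = len(input_ids)
--     if attention_mask is not None:
--         for idx in range(len(input_ids)):
--             if int(attention_mask[idx]) == 0:
--                 cutoff = idx
--                 break
--     # Pass 2: filter the truncated prefix.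
--     ignore = ignore_token_ids or set()
--     return [int(t) for t in input_ids[:cutoff] if int(t) not in ignore]
-- ===== Notes on version B (the rewrite author's own statement) =====
-- stated objective: simpler
-- what changed: A's single break/continue/append loop is decomposed into a cutoff-finding pass over mask indices followed by a filtering comprehension over the truncated prefix.
import Mathlib
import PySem

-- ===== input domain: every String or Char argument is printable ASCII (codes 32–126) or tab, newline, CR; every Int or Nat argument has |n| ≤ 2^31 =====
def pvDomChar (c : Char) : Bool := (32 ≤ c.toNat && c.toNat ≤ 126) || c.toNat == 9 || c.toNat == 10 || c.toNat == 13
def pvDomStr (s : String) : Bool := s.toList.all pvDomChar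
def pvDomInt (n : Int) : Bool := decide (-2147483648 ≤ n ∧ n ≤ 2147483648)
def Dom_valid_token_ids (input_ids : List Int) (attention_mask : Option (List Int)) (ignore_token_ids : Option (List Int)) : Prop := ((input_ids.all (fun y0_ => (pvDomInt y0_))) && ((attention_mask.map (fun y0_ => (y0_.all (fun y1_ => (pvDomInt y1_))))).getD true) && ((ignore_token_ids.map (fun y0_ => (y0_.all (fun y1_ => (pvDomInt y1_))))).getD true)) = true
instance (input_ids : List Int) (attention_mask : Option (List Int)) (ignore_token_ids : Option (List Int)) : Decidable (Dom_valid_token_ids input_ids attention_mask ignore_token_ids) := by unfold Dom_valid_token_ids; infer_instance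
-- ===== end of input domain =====

-- B splits A's single break/continue/append loop into a cutoff-finding pass plus a
-- filter over the truncated prefix (objective: simpler decomposition, same cost).

-- ===== PORT A =====
-- A's loop: enumerate input_ids, break when the mask entry is 0 (pyGet? none = the
-- IndexError of a too-short mask, excluded by Pre_), skip ignored tokens, append.
def vtiLoopA (am : Option (List Int)) (ig : List Int) : Nat → List Int → List Int
  | _, [] => []
  | idx, t :: rest =>
    match am with
    | some m =>
      match PySem.List.pyGet? m (Int.ofNat idx) with
      | none => []   -- IndexError in Python; outside Pre_
      | some v =>
        if v = 0 then []
        else if t ∈ ig then vtiLoopA (some m) ig (idx + 1) rest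
        else t :: vtiLoopA (some m) ig (idx + 1) rest
    | none =>
      if t ∈ ig then vtiLoopA none ig (idx + 1) rest
      else t :: vtiLoopA none ig (idx + 1) rest

def valid_token_ids (input_ids : List Int) (attention_mask : Option (List Int)) (ignore_token_ids : Option (List Int)) : List Int :=
  vtiLoopA attention_mask (ignore_token_ids.getD []) 0 input_ids

-- ===== PORT B =====
-- B's pass 1: scan indices idx, idx+1, … (k of them) for the first 0 mask entry;
-- default cutoff n = len(input_ids).  pyGet? none = Python's IndexError, outside Pre_.
def vtiCutoffB (m : List Int) (n : Nat) : Nat → Nat → Nat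
  | _, 0 => n
  | idx, k + 1 =>
    match PySem.List.pyGet? m (Int.ofNat idx) with
    | none => n    -- IndexError in Python; outside Pre_
    | some v => if v = 0 then idx else vtiCutoffB m n (idx + 1) k

def valid_token_ids_alt (input_ids : List Int) (attention_mask : Option (List Int)) (ignore_token_ids : Option (List Int)) : List Int :=
  let cutoff : Nat :=
    match attention_mask with
    | none => input_ids.length
    | some m => vtiCutoffB m input_ids.length 0 input_ids.length
  let ig := ignore_token_ids.getD []
  (input_ids.take cutoff).filter (fun t => ¬ t ∈ ig)

-- ===== PRECONDITION & SPEC =====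
-- Pre_ excludes exactly the inputs on which A raises IndexError: a mask shorter than
-- input_ids that contains no 0 (B raises the same IndexError there).
def Pre_valid_token_ids (input_ids : List Int) (attention_mask : Option (List Int)) (ignore_token_ids : Option (List Int)) : Prop :=
  ∀ m, attention_mask = some m → (input_ids.length ≤ m.length ∨ (0 : Int) ∈ m)
instance (input_ids : List Int) (attention_mask : Option (List Int)) (ignore_token_ids : Option (List Int)) : Decidable (Pre_valid_token_ids input_ids attention_mask ignore_token_ids) := by unfold Pre_valid_token_ids; infer_instance

def pvWitness_valid_token_ids : List Int × Option (List Int) × Option (List Int) := ([5, 6, 7], some [1, 1, 0], some [6])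

def Spec_valid_token_ids (input_ids : List Int) (attention_mask : Option (List Int)) (ignore_token_ids : Option (List Int)) (out : List Int) : Prop := out = valid_token_ids_alt input_ids attention_mask ignore_token_ids
instance (input_ids : List Int) (attention_mask : Option (List Int)) (ignore_token_ids : Option (List Int)) (out : List Int) : Decidable (Spec_valid_token_ids input_ids attention_mask ignore_token_ids out) := by unfold Spec_valid_token_ids; infer_instance

-- ===== CLAIM (what is proved, stated in full; the proofs are below) =====
def Claim_equal_valid_token_ids : Prop := ∀ (input_ids : List Int) (attention_mask : Option (List Int)) (ignore_token_ids : Option (List Int)), Dom_valid_token_ids input_ids attention_mask ignore_token_ids → Pre_valid_token_ids input_ids attention_mask ignore_token_ids → Spec_valid_token_ids input_ids attention_mask ignore_token_ids (valid_token_ids input_ids attention_mask ignore_token_ids)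

-- ===== LEMMAS AND PROOFS =====

-- With no mask, A's loop is a plain filter.
theorem vtiLoopA_none (ig : List Int) : ∀ (ids : List Int) (idx : Nat),
    vtiLoopA none ig idx ids = ids.filter (fun t => ¬ t ∈ ig) := by
  intro ids
  induction ids with
  | nil => intro idx; simp [vtiLoopA]
  | cons t rest ih =>
    intro idx
    by_cases h : t ∈ ig <;> simp [vtiLoopA, h, ih (idx + 1)]

-- B's cutoff never falls below its start index.
theorem vtiCutoffB_ge (m : List Int) : ∀ (k idx n : Nat), idx + k ≤ n →
    idx ≤ vtiCutoffB m n idx k := by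
  intro k
  induction k with
  | zero => intro idx n h; simpa [vtiCutoffB] using h
  | succ k ih =>
    intro idx n h
    simp only [vtiCutoffB]
    cases hg : PySem.List.pyGet? m (Int.ofNat idx) with
    | none => simp; omega
    | some v =>
      by_cases hv0 : v = 0
      · simp [hv0]
      · simp only [if_neg hv0]
        have := ih (idx + 1) n (by omega)
        simp
        omega

-- With a mask, A's loop equals B's filter-of-prefix, for any start index idx whose
-- remaining scan cannot fall off the mask (the generalized Pre_).
theorem vtiLoopA_some (m ig : List Int) : ∀ (ids : List Int) (idx : Nat),
    (idx + ids.length ≤ m.length ∨ ∃ j, idx ≤ j ∧ ∃ h : j < m.length, m[j] = 0) →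
    vtiLoopA (some m) ig idx ids
      = (ids.take (vtiCutoffB m (idx + ids.length) idx ids.length - idx)).filter (fun t => ¬ t ∈ ig) := by
  intro ids
  induction ids with
  | nil => intro idx _; simp [vtiLoopA, vtiCutoffB]
  | cons t rest ih =>
    intro idx hsafe
    have hidx : idx < m.length := by
      rcases hsafe with h | ⟨j, hij, hj, _⟩
      · simpa using Nat.lt_of_lt_of_le (by simp) h
      · omega
    have hgetE : m[idx]? = some m[idx] := List.getElem?_eq_getElem hidx
    have hget : PySem.List.pyGet? m (Int.ofNat idx) = some m[idx] := by simp [hgetE]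
    by_cases hv : m[idx] = 0
    · simp [vtiLoopA, vtiCutoffB, hgetE, hv]
    · have hsafe' : (idx + 1) + rest.length ≤ m.length ∨
          ∃ j, idx + 1 ≤ j ∧ ∃ h : j < m.length, m[j] = 0 := by
        rcases hsafe with h | ⟨j, hij, hj, hz⟩
        · left; simp at h; omega
        · right; refine ⟨j, ?_, hj, hz⟩
          rcases Nat.eq_or_lt_of_le hij with rfl | h
          · exact absurd hz hv
          · omega
      have hrec := ih (idx + 1) hsafe'
      have hge : idx + 1 ≤ vtiCutoffB m ((idx + 1) + rest.length) (idx + 1) rest.length :=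
        vtiCutoffB_ge m rest.length (idx + 1) _ (le_refl _)
      set c := vtiCutoffB m ((idx + 1) + rest.length) (idx + 1) rest.length with hc
      have hlen : idx + (t :: rest).length = (idx + 1) + rest.length := by
        simp [Nat.add_comm, Nat.add_left_comm]
      have hcut : vtiCutoffB m (idx + (t :: rest).length) idx (t :: rest).length = c := by
        simp only [List.length_cons, vtiCutoffB, hget, if_neg hv, hc]
        congr 1
      have htake : (t :: rest).take (c - idx) = t :: rest.take (c - (idx + 1)) := by
        have h1 : c - idx = (c - (idx + 1)) + 1 := by omega
        simp [h1]
      rw [hcut, htake]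
      by_cases ht : t ∈ ig
      · simp [vtiLoopA, hgetE, hv, ht, hrec]
      · simp [vtiLoopA, hgetE, hv, ht, hrec]

-- ===== VERDICT (by name: the statement is the Claim_ definition above) =====
theorem valid_token_ids_spec : Claim_equal_valid_token_ids := by
  intro ids am ig _ hpre
  unfold Spec_valid_token_ids valid_token_ids valid_token_ids_alt
  match am with
  | none => simp [vtiLoopA_none (ig.getD []) ids 0]
  | some m =>
    have hm := hpre m rfl
    have hsafe : 0 + ids.length ≤ m.length ∨ ∃ j, 0 ≤ j ∧ ∃ h : j < m.length, m[j] = 0 := by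
      rcases hm with h | h
      · left; simpa using h
      · right
        obtain ⟨j, hj, hz⟩ := List.getElem_of_mem h
        exact ⟨j, Nat.zero_le _, hj, hz⟩
    have hmain := vtiLoopA_some m (ig.getD []) ids 0 hsafe
    simpa using hmain
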